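-- pv_equiv track=rewrite | github.com/hyerim0414/Algorithm | Programmers_124나라의숫자.py | solution
-- ===== SOURCE A (Python) =====
-- base=[4,1,2]
--
-- def solution(n):
--     num=''
--     while(n>0):
--         r=n%3
--         n=n//3
--         if(r==0):
--             n-=1
--         num=str(base[r])+num
--     return num
-- ===== SOURCE B (Python) =====
-- def solution(n):
--     if n <= 0:
--         return ''
--     # length of the answer: smallest L >= 1 with 3 + 3^2 + ... + 3^L >= n
--     L, total = 1, 3
--     while total < n:
--         L += 1
--         total += 3 ** L
--     # 0-based rank of n within the block of length-L numerals
--     offset = n - (3 ** L - 3) // 2 - 1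
--     # write offset in base 3 with exactly L digits, mapped through 0->'1', 1->'2', 2->'4'
--     digs = []
--     for _ in range(L):
--         digs.append('124'[offset % 3])
--         offset //= 3
--     return ''.join(reversed(digs))
-- ===== Notes on version B (the rewrite author's own statement) =====
-- stated objective: alternative
-- what changed: A builds the numeral digit by digit with a %3-and-conditional-decrement loop prepending to a string; B first finds the output length L from the cumulative count 3+3^2+...+3^L, computes the 0-based rank within the length-L block, and writes that rank in ordinary base 3 as L digits mapped through '124'.
import Mathlib
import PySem

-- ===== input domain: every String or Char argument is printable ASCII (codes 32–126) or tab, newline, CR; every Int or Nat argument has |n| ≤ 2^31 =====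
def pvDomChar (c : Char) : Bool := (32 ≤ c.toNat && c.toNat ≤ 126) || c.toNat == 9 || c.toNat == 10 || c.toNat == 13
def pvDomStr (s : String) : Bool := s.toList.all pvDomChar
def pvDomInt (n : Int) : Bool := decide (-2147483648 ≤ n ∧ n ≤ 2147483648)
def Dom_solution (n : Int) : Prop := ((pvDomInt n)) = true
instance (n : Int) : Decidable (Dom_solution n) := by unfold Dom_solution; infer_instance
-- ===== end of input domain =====

-- B determines the digit count up front and fills the digits from a base-3 rank, instead of A's
-- per-step %3-and-decrement loop; objective: alternative (same behaviour, different algorithm).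

-- ===== PORT A =====
-- while(n>0): r=n%3; n=n//3; if r==0: n-=1; num=str(base[r])+num
-- base[r] is always in range (r = n%3 ∈ {0,1,2}), so the .getD default is never used.
def solutionLoopA (n : Int) (num : String) : String :=
  if 0 < n then
    let r := PySem.Int.mod n 3
    let n2 := PySem.Int.floordiv n 3
    let n3 := if r = 0 then n2 - 1 else n2
    solutionLoopA n3 (PySem.Int.toStr ((PySem.List.pyGet? [4, 1, 2] r).getD 0) ++ num)
  else num
termination_by n.toNat
decreasing_by
  rename_i h
  have h3 : (0:Int) < 3 := by norm_num
  have hf : PySem.Int.floordiv n 3 = n / 3 := PySem.Int.floordiv_eq_ediv_of_pos h3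
  split <;> simp only [hf] <;> omega

def solution (n : Int) : String := solutionLoopA n ""

-- ===== PORT B =====
-- while total < n: L += 1; total += 3 ** L
def lenLoopB (n L total : Int) : Int :=
  if total < n then lenLoopB n (L + 1) (total + 3 ^ (L + 1).toNat) else L
termination_by (n - total).toNat
decreasing_by
  have : (0:Int) < 3 ^ (L + 1).toNat := pow_pos (by norm_num) _
  omega

-- for _ in range(L): digs.append('124'[offset % 3]); offset //= 3
-- '124'[offset % 3] is always in range (% 3 of Python gives 0,1,2), so .getD is never used.
def digsLoopB : Nat → Int → List Char → List Char
  | 0, _, acc => acc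
  | k + 1, off, acc =>
      digsLoopB k (PySem.Int.floordiv off 3)
        (acc ++ [(PySem.Str.pyGet? "124" (PySem.Int.mod off 3)).getD ' '])

def solution_alt (n : Int) : String :=
  if n ≤ 0 then "" else
    let L := lenLoopB n 1 3
    let off := n - PySem.Int.floordiv (3 ^ L.toNat - 3) 2 - 1
    String.ofList ((digsLoopB L.toNat off []).reverse)

-- ===== PRECONDITION & SPEC =====
def Spec_solution (n : Int) (out : String) : Prop := out = solution_alt n
instance (n : Int) (out : String) : Decidable (Spec_solution n out) := by unfold Spec_solution; infer_instance

-- ===== CLAIM (what is proved, stated in full; the proofs are below) =====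
def Claim_equal_solution : Prop := ∀ (n : Int), Dom_solution n → Spec_solution n (solution n)

-- ===== LEMMAS AND PROOFS =====

-- cnt L = 3 + 3^2 + ... + 3^L, the number of numerals of length ≤ L
def cnt : Nat → Int
  | 0 => 0
  | L + 1 => 3 * cnt L + 3

-- the digit character for a base-3 digit 0,1,2
def chr3 (d : Int) : Char := if d = 0 then '1' else if d = 1 then '2' else '4'

-- accumulator-free digit list (last-extracted digit first after reversing is handled by digs order)
def digs : Nat → Int → List Char
  | 0, _ => []
  | k + 1, off => chr3 (PySem.Int.mod off 3) :: digs k (PySem.Int.floordiv off 3)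

lemma cnt_nonneg (L : Nat) : 0 ≤ cnt L := by
  induction L with
  | zero => simp [cnt]
  | succ L ih => simp [cnt]; omega

lemma cnt_lt_succ (L : Nat) : cnt L < cnt (L + 1) := by
  have := cnt_nonneg L; simp [cnt]; omega

lemma cnt_strictMono : StrictMono cnt :=
  strictMono_nat_of_lt_succ cnt_lt_succ

lemma two_cnt (L : Nat) : 2 * cnt L = 3 ^ (L + 1) - 3 := by
  induction L with
  | zero => simp [cnt]
  | succ L ih => simp [cnt, pow_succ]; omega

-- '124'[r].getD for r = 0,1,2 is chr3 r
lemma pyGet124 (r : Int) (h0 : 0 ≤ r) (h3 : r < 3) :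
    ((PySem.Str.pyGet? "124" r).getD ' ') = chr3 r := by
  interval_cases r <;> decide

-- digsLoopB with accumulator = acc ++ digs
lemma digsLoopB_eq (k : Nat) : ∀ (off : Int) (acc : List Char),
    digsLoopB k off acc = acc ++ (digs k off).map id := by
  induction k with
  | zero => intro off acc; simp [digsLoopB, digs]
  | succ k ih =>
      intro off acc
      have hme := PySem.Int.mod_eq_emod_of_pos (a := off) (b := 3) (by norm_num)
      have h0 : 0 ≤ PySem.Int.mod off 3 := by rw [hme]; exact Int.emod_nonneg off (by norm_num)
      have h3 : PySem.Int.mod off 3 < 3 := by rw [hme]; exact Int.emod_lt_of_pos off (by norm_num)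
      rw [digsLoopB, digs, ih, pyGet124 _ h0 h3]
      simp

-- characterization of the length loop
lemma lenLoopB_spec (n L total : Int) :
    1 ≤ L → total = cnt L.toNat →
    L ≤ lenLoopB n L total ∧ n ≤ cnt (lenLoopB n L total).toNat ∧
      (lenLoopB n L total = L ∨ cnt ((lenLoopB n L total).toNat - 1) < n) := by
  fun_induction lenLoopB n L total with
  | case1 L total h ih =>
      intro hL ht
      have hLs : (L + 1).toNat = L.toNat + 1 := by omega
      have ht' : total + 3 ^ (L + 1).toNat = cnt (L + 1).toNat := by
        rw [hLs]
        have h2 := two_cnt L.toNat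
        have h3 : cnt (L.toNat + 1) = 3 * cnt L.toNat + 3 := rfl
        omega
      obtain ⟨ih1, ih2, ih3⟩ := ih (by omega) ht'
      refine ⟨by omega, ih2, Or.inr ?_⟩
      rcases ih3 with heq | hlt
      · rw [heq, hLs]
        simpa [ht] using h
      · exact hlt
  | case2 L total h =>
      intro hL ht
      exact ⟨le_refl _, by omega, Or.inl rfl⟩

-- uniqueness of the bracketing length
lemma len_unique (n : Int) (K K' : Nat) (hK : 1 ≤ K) (hK' : 1 ≤ K')
    (h1 : cnt (K - 1) < n) (h2 : n ≤ cnt K) (h1' : cnt (K' - 1) < n) (h2' : n ≤ cnt K') :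
    K = K' := by
  rcases lt_trichotomy K K' with h | h | h
  · have : cnt K ≤ cnt (K' - 1) := cnt_strictMono.monotone (by omega)
    omega
  · exact h
  · have : cnt K' ≤ cnt (K - 1) := cnt_strictMono.monotone (by omega)
    omega

-- B in closed form for n ≥ 1
lemma solution_alt_closed (n : Int) (hn : 1 ≤ n) :
    solution_alt n =
      String.ofList ((digs (lenLoopB n 1 3).toNat (n - cnt ((lenLoopB n 1 3).toNat - 1) - 1)).reverse) := by
  obtain ⟨h1, h2, h3⟩ := lenLoopB_spec n 1 3 (by norm_num) (by decide)
  have hKt : (lenLoopB n 1 3).toNat - 1 + 1 = (lenLoopB n 1 3).toNat := by omega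
  have h2c := two_cnt ((lenLoopB n 1 3).toNat - 1)
  rw [hKt] at h2c
  have hfd : PySem.Int.floordiv (3 ^ (lenLoopB n 1 3).toNat - 3) 2
      = cnt ((lenLoopB n 1 3).toNat - 1) := by
    rw [PySem.Int.floordiv_eq_ediv_of_pos (by norm_num)]
    omega
  unfold solution_alt
  rw [if_neg (by omega)]
  simp only [hfd, digsLoopB_eq, List.map_id, List.nil_append]

-- the A-side recurrence
lemma loopA_acc : ∀ (m : Nat) (n : Int), n.toNat = m →
    ∀ acc : String, solutionLoopA n acc = solutionLoopA n "" ++ acc := by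
  intro m
  induction m using Nat.strong_induction_on with
  | _ m ih =>
    intro n hm acc
    by_cases h : 0 < n
    · have hf : PySem.Int.floordiv n 3 = n / 3 :=
        PySem.Int.floordiv_eq_ediv_of_pos (by norm_num)
      conv_lhs => rw [solutionLoopA]
      conv_rhs => rw [solutionLoopA]
      rw [if_pos h, if_pos h]
      simp only [hf]
      set n3 : Int := if PySem.Int.mod n 3 = 0 then n / 3 - 1 else n / 3 with hn3
      have hlt : n3.toNat < m := by
        have := Int.ediv_le_self (3 : Int) (le_of_lt h)
        split at hn3 <;> omega
      set dg : String := PySem.Int.toStr ((PySem.List.pyGet? [4, 1, 2] (PySem.Int.mod n 3)).getD 0)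
      rw [ih n3.toNat hlt n3 rfl (dg ++ acc), ih n3.toNat hlt n3 rfl (dg ++ "")]
      rw [String.append_empty, String.append_assoc]
    · conv_lhs => rw [solutionLoopA]
      conv_rhs => rw [solutionLoopA]
      rw [if_neg h, if_neg h, String.empty_append]

-- common recurrence data: for n ≥ 1, d = (n%3 = 0 ? 3 : n%3), m' = (n - d)/3
def dOf (n : Int) : Int := if n % 3 = 0 then 3 else n % 3
def mOf (n : Int) : Int := (n - dOf n) / 3

lemma solution_rec (n : Int) (hn : 1 ≤ n) :
    solution n = solution (mOf n) ++ String.singleton (chr3 (dOf n - 1)) := by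
  have hme : PySem.Int.mod n 3 = n % 3 := PySem.Int.mod_eq_emod_of_pos (by norm_num)
  have hf : PySem.Int.floordiv n 3 = n / 3 := PySem.Int.floordiv_eq_ediv_of_pos (by norm_num)
  unfold solution
  rw [solutionLoopA, if_pos (by omega)]
  simp only [hme, hf]
  have hn3 : (if n % 3 = 0 then n / 3 - 1 else n / 3) = mOf n := by
    unfold mOf dOf
    split <;> omega
  have hdg : PySem.Int.toStr ((PySem.List.pyGet? [4, 1, 2] (n % 3)).getD 0)
      = String.singleton (chr3 (dOf n - 1)) := by
    have hr : n % 3 = 0 ∨ n % 3 = 1 ∨ n % 3 = 2 := by omega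
    unfold dOf
    rcases hr with h | h | h <;> rw [h] <;> decide
  rw [hn3, hdg, loopA_acc (mOf n).toNat (mOf n) rfl, String.append_empty]

lemma dm_facts (n : Int) (_hn : 1 ≤ n) :
    1 ≤ dOf n ∧ dOf n ≤ 3 ∧ n = 3 * mOf n + dOf n := by
  unfold mOf dOf
  split <;> omega

lemma cnt_pred (K : Nat) (hK : 1 ≤ K) : cnt K = 3 * cnt (K - 1) + 3 := by
  have h : K - 1 + 1 = K := by omega
  conv_lhs => rw [← h]
  rfl

lemma solution_alt_rec (n : Int) (hn : 4 ≤ n) :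
    solution_alt n = solution_alt (mOf n) ++ String.singleton (chr3 (dOf n - 1)) := by
  obtain ⟨hd1, hd3, hnm⟩ := dm_facts n (by omega)
  have hm1 : 1 ≤ mOf n := by omega
  obtain ⟨h1, h2, h3⟩ := lenLoopB_spec n 1 3 (by norm_num) (by decide)
  set K := (lenLoopB n 1 3).toNat with hKdef
  have hK2 : 2 ≤ K := by
    by_contra hc
    have hKle : K ≤ 1 := by omega
    have : cnt K ≤ cnt 1 := cnt_strictMono.monotone hKle
    have : cnt 1 = 3 := by decide
    omega
  have hlow : cnt (K - 1) < n := by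
    rcases h3 with heq | hlt
    · omega
    · exact hlt
  have hcK : cnt K = 3 * cnt (K - 1) + 3 := cnt_pred K (by omega)
  have hcK1 : cnt (K - 1) = 3 * cnt (K - 2) + 3 := by
    have := cnt_pred (K - 1) (by omega)
    simpa [Nat.sub_sub] using this
  -- bracketing for mOf n
  have hmlow : cnt (K - 2) < mOf n := by omega
  have hmhigh : mOf n ≤ cnt (K - 1) := by omega
  obtain ⟨h1', h2', h3'⟩ := lenLoopB_spec (mOf n) 1 3 (by norm_num) (by decide)
  set K' := (lenLoopB (mOf n) 1 3).toNat with hK'def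
  have hlow' : cnt (K' - 1) < mOf n := by
    rcases h3' with heq | hlt
    · have hK'1 : K' = 1 := by omega
      rw [hK'1]
      have h00 : cnt (1 - 1) = (0 : Int) := rfl
      omega
    · exact hlt
  have hKK : K' = K - 1 :=
    len_unique (mOf n) K' (K - 1) (by omega) (by omega) hlow' h2' hmlow hmhigh
  -- offsets
  have hoff : n - cnt (K - 1) - 1 = 3 * (mOf n - cnt (K - 2) - 1) + (dOf n - 1) := by omega
  have hoffm0 : 0 ≤ mOf n - cnt (K - 2) - 1 := by omega
  -- one digs step
  set off := n - cnt (K - 1) - 1 with hoffdef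
  have hKs : K = (K - 1) + 1 := by omega
  have hmod : PySem.Int.mod off 3 = dOf n - 1 := by
    rw [PySem.Int.mod_eq_emod_of_pos (by norm_num)]
    omega
  have hdiv : PySem.Int.floordiv off 3 = mOf n - cnt (K - 2) - 1 := by
    rw [PySem.Int.floordiv_eq_ediv_of_pos (by norm_num)]
    omega
  have hdigs : digs K off = chr3 (dOf n - 1) :: digs (K - 1) (mOf n - cnt (K - 2) - 1) := by
    conv_lhs => rw [hKs]
    have e1 : digs ((K - 1) + 1) off
        = chr3 (PySem.Int.mod off 3) :: digs (K - 1) (PySem.Int.floordiv off 3) := rfl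
    rw [e1, hmod, hdiv]
  rw [solution_alt_closed n (by omega), solution_alt_closed (mOf n) hm1,
    ← hKdef, ← hK'def, hKK, ← hoffdef, hdigs, List.reverse_cons, String.ofList_append,
    String.singleton_eq_ofList]
  congr 2

lemma solution_alt_small (n : Int) (h1 : 1 ≤ n) (h3 : n ≤ 3) :
    solution_alt n = String.singleton (chr3 (n - 1)) := by
  have hK : lenLoopB n 1 3 = 1 := by rw [lenLoopB, if_neg (by omega)]
  rw [solution_alt_closed n h1, hK]
  have hmod : PySem.Int.mod (n - cnt 0 - 1) 3 = n - 1 := by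
    rw [PySem.Int.mod_eq_emod_of_pos (by norm_num)]
    simp only [cnt]
    omega
  show String.ofList ((digs 1 (n - cnt 0 - 1)).reverse) = _
  simp only [digs, hmod, List.reverse_singleton, String.singleton_eq_ofList]

lemma main_eq_aux : ∀ (m : Nat) (n : Int), n.toNat = m → solution n = solution_alt n := by
  intro m
  induction m using Nat.strong_induction_on with
  | _ m ih =>
    intro n hm
    by_cases h0 : n ≤ 0
    · have hA : solution n = "" := by
        unfold solution
        rw [solutionLoopA, if_neg (by omega)]
      have hB : solution_alt n = "" := by
        unfold solution_alt
        rw [if_pos h0]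
      rw [hA, hB]
    · by_cases h3 : n ≤ 3
      · obtain ⟨hd1, hd3, hnm⟩ := dm_facts n (by omega)
        have hm0 : mOf n = 0 := by omega
        have hdn : dOf n = n := by omega
        rw [solution_rec n (by omega), solution_alt_small n (by omega) h3, hm0]
        have : solution 0 = "" := by
          unfold solution
          rw [solutionLoopA, if_neg (by omega)]
        rw [this, String.empty_append, hdn]
      · obtain ⟨hd1, hd3, hnm⟩ := dm_facts n (by omega)
        have hmlt : (mOf n).toNat < m := by omega
        rw [solution_rec n (by omega), solution_alt_rec n (by omega),
          ih (mOf n).toNat hmlt (mOf n) rfl]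

lemma main_eq (n : Int) : solution n = solution_alt n :=
  main_eq_aux n.toNat n rfl

-- ===== VERDICT (by name: the statement is the Claim_ definition above) =====
theorem solution_spec : Claim_equal_solution := by
  intro n _
  unfold Spec_solution
  exact main_eq n
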